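-- pv_equiv track=rewrite | github.com/niamoto/niamoto | src/niamoto/gui/api/routers/stats.py | _classify_geometry_kind
-- ===== SOURCE A (Python) =====
-- from typing import Any, Dict, List, Optional, Tuple
--
-- def _classify_geometry_kind(geometry_types: List[str]) -> str:
--     """Return a coarse map rendering kind from geometry type names."""
--     normalized = {geometry_type.upper() for geometry_type in geometry_types}
--     if not normalized:
--         return "unknown"
--     if normalized <= {"POINT", "MULTIPOINT"}:
--         return "point"
--     if normalized <= {"POLYGON", "MULTIPOLYGON"}:
--         return "polygon"
--     if normalized <= {"LINESTRING", "MULTILINESTRING"}: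
--         return "line"
--     return "mixed"
-- ===== SOURCE B (Python) =====
-- def _classify_geometry_kind(geometry_types):
--     """One streaming pass: combine per-element kinds in a small state machine.
--
--     State starts at 'unknown'; each element contributes point/polygon/line/mixed,
--     and two different contributions collapse to 'mixed' (early exit: 'mixed' is
--     absorbing).  No set is ever materialized.
--     """
--     kind = "unknown"
--     for t in geometry_types:
--         u = t.upper()
--         if u == "POINT" or u == "MULTIPOINT":
--             k = "point"
--         elif u == "POLYGON" or u == "MULTIPOLYGON":
--             k = "polygon"
--         elif u == "LINESTRING" or u == "MULTILINESTRING":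
--             k = "line"
--         else:
--             k = "mixed"
--         if kind == "unknown":
--             kind = k
--         elif kind != k:
--             kind = "mixed"
--         if kind == "mixed":
--             return "mixed"
--     return kind
-- ===== Notes on version B (the rewrite author's own statement) =====
-- stated objective: alternative
-- what changed: Replaces A's build-a-set-then-three-subset-tests with a single streaming fold over a five-state accumulator (unknown/point/polygon/line/mixed) that merges per-element kinds and exits early once the state becomes the absorbing 'mixed'; no set is built.
import Mathlib
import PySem

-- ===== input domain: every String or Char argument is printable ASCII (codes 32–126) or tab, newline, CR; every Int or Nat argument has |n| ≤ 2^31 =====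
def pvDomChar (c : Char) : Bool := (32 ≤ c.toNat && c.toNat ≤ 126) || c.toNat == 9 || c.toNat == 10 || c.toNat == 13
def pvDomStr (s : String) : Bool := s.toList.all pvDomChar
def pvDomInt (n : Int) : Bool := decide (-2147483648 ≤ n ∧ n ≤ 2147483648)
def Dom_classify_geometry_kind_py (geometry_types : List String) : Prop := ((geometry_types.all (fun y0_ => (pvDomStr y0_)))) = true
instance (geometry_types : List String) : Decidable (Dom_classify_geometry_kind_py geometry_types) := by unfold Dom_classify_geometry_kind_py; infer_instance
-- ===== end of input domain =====

-- B replaces A's set-plus-subset-tests by a single streaming pass with a five-state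
-- accumulator that merges per-element kinds ('mixed' absorbing, early exit); objective: alternative.

-- ===== PORT A =====
def classify_geometry_kind_py (geometry_types : List String) : String :=
  let normalized : PySem.Set String :=
    PySem.Set.ofList (geometry_types.map (fun geometry_type => PySem.Str.upper geometry_type))
  if normalized = [] then "unknown"
  else if PySem.Set.issubset normalized ["POINT", "MULTIPOINT"] then "point"
  else if PySem.Set.issubset normalized ["POLYGON", "MULTIPOLYGON"] then "polygon"
  else if PySem.Set.issubset normalized ["LINESTRING", "MULTILINESTRING"] then "line"
  else "mixed"

-- ===== PORT B =====
-- per-element coarse kind (the if/elif chain of Source B's loop body)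
def pvKindOf (t : String) : String :=
  if PySem.Str.upper t = "POINT" ∨ PySem.Str.upper t = "MULTIPOINT" then "point"
  else if PySem.Str.upper t = "POLYGON" ∨ PySem.Str.upper t = "MULTIPOLYGON" then "polygon"
  else if PySem.Str.upper t = "LINESTRING" ∨ PySem.Str.upper t = "MULTILINESTRING" then "line"
  else "mixed"

-- the loop of Source B: accumulator `kind`, early return on "mixed"
def pvAltLoop (rest : List String) (kind : String) : String :=
  match rest with
  | [] => kind
  | t :: rest' =>
    let k := pvKindOf t
    let kind' := if kind = "unknown" then k else if kind ≠ k then "mixed" else kind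
    if kind' = "mixed" then "mixed" else pvAltLoop rest' kind'

def classify_geometry_kind_py_alt (geometry_types : List String) : String :=
  pvAltLoop geometry_types "unknown"

-- ===== PRECONDITION & SPEC =====
def Spec_classify_geometry_kind_py (geometry_types : List String) (out : String) : Prop := out = classify_geometry_kind_py_alt geometry_types
instance (geometry_types : List String) (out : String) : Decidable (Spec_classify_geometry_kind_py geometry_types out) := by unfold Spec_classify_geometry_kind_py; infer_instance

-- ===== CLAIM (what is proved, stated in full; the proofs are below) =====
def Claim_equal_classify_geometry_kind_py : Prop := ∀ (geometry_types : List String), Dom_classify_geometry_kind_py geometry_types → Spec_classify_geometry_kind_py geometry_types (classify_geometry_kind_py geometry_types)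

-- ===== LEMMAS AND PROOFS =====

theorem pv_ofList_eq_nil_iff {α : Type} [BEq α] [LawfulBEq α] (xs : List α) :
    PySem.Set.ofList xs = [] ↔ xs = [] := by
  constructor
  · intro h
    cases xs with
    | nil => rfl
    | cons a l =>
      have : a ∈ PySem.Set.ofList (a :: l) := (PySem.Set.mem_ofList _ _).mpr (List.mem_cons_self)
      rw [h] at this
      exact absurd this (List.not_mem_nil)
  · intro h; subst h; rfl

-- pvKindOf hits each kind exactly on the corresponding pair of uppercase names
theorem pv_kindOf_eq_point (t : String) :
    pvKindOf t = "point" ↔ (PySem.Str.upper t = "POINT" ∨ PySem.Str.upper t = "MULTIPOINT") := by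
  unfold pvKindOf; split_ifs with h1 h2 h3
  · simpa using h1
  · exact ⟨fun h => absurd h (by decide), fun h => absurd h h1⟩
  · exact ⟨fun h => absurd h (by decide), fun h => absurd h h1⟩
  · exact ⟨fun h => absurd h (by decide), fun h => absurd h h1⟩

theorem pv_kindOf_eq_polygon (t : String) :
    pvKindOf t = "polygon" ↔ (PySem.Str.upper t = "POLYGON" ∨ PySem.Str.upper t = "MULTIPOLYGON") := by
  unfold pvKindOf; split_ifs with h1 h2 h3
  · constructor
    · intro h; exact absurd h (by decide)
    · intro h; rcases h1 with ha | ha <;> rcases h with hb | hb <;> rw [ha] at hb <;> exact absurd hb (by decide)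
  · simpa using h2
  · exact ⟨fun h => absurd h (by decide), fun h => absurd h h2⟩
  · exact ⟨fun h => absurd h (by decide), fun h => absurd h h2⟩

theorem pv_kindOf_eq_line (t : String) :
    pvKindOf t = "line" ↔ (PySem.Str.upper t = "LINESTRING" ∨ PySem.Str.upper t = "MULTILINESTRING") := by
  unfold pvKindOf; split_ifs with h1 h2 h3
  · constructor
    · intro h; exact absurd h (by decide)
    · intro h; rcases h1 with ha | ha <;> rcases h with hb | hb <;> rw [ha] at hb <;> exact absurd hb (by decide)
  · constructor
    · intro h; exact absurd h (by decide)
    · intro h; rcases h2 with ha | ha <;> rcases h with hb | hb <;> rw [ha] at hb <;> exact absurd hb (by decide)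
  · simpa using h3
  · exact ⟨fun h => absurd h (by decide), fun h => absurd h h3⟩

theorem pv_kindOf_cases (t : String) :
    pvKindOf t = "point" ∨ pvKindOf t = "polygon" ∨ pvKindOf t = "line" ∨ pvKindOf t = "mixed" := by
  unfold pvKindOf; split_ifs <;> simp

-- loop invariant: once the accumulator holds a real kind k, the loop returns k
-- iff every remaining element also classifies to k, and "mixed" otherwise
theorem pv_altLoop_inv (k : String) (hk : k = "point" ∨ k = "polygon" ∨ k = "line")
    (rest : List String) :
    pvAltLoop rest k = if ∀ t ∈ rest, pvKindOf t = k then k else "mixed" := by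
  induction rest with
  | nil => simp [pvAltLoop]
  | cons t rest' ih =>
    have hku : k ≠ "unknown" := by rcases hk with rfl | rfl | rfl <;> decide
    have hkm : k ≠ "mixed" := by rcases hk with rfl | rfl | rfl <;> decide
    by_cases ht : pvKindOf t = k
    · have hall : (∀ x ∈ t :: rest', pvKindOf x = k) ↔ (∀ x ∈ rest', pvKindOf x = k) := by
        constructor
        · intro h x hx; exact h x (List.mem_cons_of_mem _ hx)
        · intro h x hx
          rcases List.mem_cons.mp hx with rfl | hx
          · exact ht
          · exact h x hx
      simp only [pvAltLoop, if_neg hku, ht, ne_eq, not_true_eq_false, if_false, if_neg hkm, ih]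
      by_cases h2 : ∀ x ∈ rest', pvKindOf x = k
      · rw [if_pos h2, if_pos (hall.mpr h2)]
      · rw [if_neg h2, if_neg (fun h => h2 (hall.mp h))]
    · have hne : k ≠ pvKindOf t := fun h => ht h.symm
      have hnall : ¬ ∀ x ∈ t :: rest', pvKindOf x = k := fun h => ht (h t List.mem_cons_self)
      simp only [pvAltLoop, if_neg hku, ne_eq, if_pos hne, if_neg hnall]
      simp

-- A's subset test against a pair of names is the all-elements-classify-to-k test
theorem pv_subset_iff (gts : List String) (k U1 U2 : String)
    (hK : ∀ t : String, pvKindOf t = k ↔ (PySem.Str.upper t = U1 ∨ PySem.Str.upper t = U2)) :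
    PySem.Set.issubset (PySem.Set.ofList (gts.map (fun t => PySem.Str.upper t))) [U1, U2] = true
      ↔ ∀ t ∈ gts, pvKindOf t = k := by
  rw [PySem.Set.issubset_iff]
  constructor
  · intro h t ht
    rw [hK]
    have := h (PySem.Str.upper t) ((PySem.Set.mem_ofList _ _).mpr (List.mem_map.mpr ⟨t, ht, rfl⟩))
    simpa using this
  · intro h x hx
    rw [PySem.Set.mem_ofList, List.mem_map] at hx
    obtain ⟨t, ht, rfl⟩ := hx
    have := (hK t).mp (h t ht)
    simpa using this

-- ===== VERDICT (by name: the statement is the Claim_ definition above) =====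
theorem classify_geometry_kind_py_spec : Claim_equal_classify_geometry_kind_py := by
  intro gts _
  unfold Spec_classify_geometry_kind_py classify_geometry_kind_py classify_geometry_kind_py_alt
  cases gts with
  | nil => rfl
  | cons t rest =>
    have hne : PySem.Set.ofList ((t :: rest).map (fun s => PySem.Str.upper s)) ≠ [] := by
      rw [Ne, pv_ofList_eq_nil_iff]; simp
    have h1 := pv_subset_iff (t :: rest) "point" "POINT" "MULTIPOINT" pv_kindOf_eq_point
    have h2 := pv_subset_iff (t :: rest) "polygon" "POLYGON" "MULTIPOLYGON" pv_kindOf_eq_polygon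
    have h3 := pv_subset_iff (t :: rest) "line" "LINESTRING" "MULTILINESTRING" pv_kindOf_eq_line
    have hstep : pvAltLoop (t :: rest) "unknown"
        = if pvKindOf t = "mixed" then "mixed" else pvAltLoop rest (pvKindOf t) := by
      simp [pvAltLoop]
    rw [hstep, if_neg hne]
    have hhd : ∀ (k : String), pvKindOf t = k → k ≠ "point" →
        ¬ ∀ x ∈ t :: rest, pvKindOf x = "point" := by
      intro k hk hne h; exact hne (hk ▸ h t List.mem_cons_self)
    rcases pv_kindOf_cases t with hk | hk | hk | hk
    · -- head is "point"
      rw [hk, if_neg (by decide : ¬ ("point" : String) = "mixed"),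
          pv_altLoop_inv "point" (Or.inl rfl) rest]
      by_cases hall : ∀ x ∈ rest, pvKindOf x = "point"
      · have hac : ∀ x ∈ t :: rest, pvKindOf x = "point" := by
          intro x hx; rcases List.mem_cons.mp hx with rfl | hx
          · exact hk
          · exact hall x hx
        rw [if_pos (h1.mpr hac), if_pos hall]
      · have hn1 : ¬ ∀ x ∈ t :: rest, pvKindOf x = "point" :=
          fun h => hall (fun x hx => h x (List.mem_cons_of_mem _ hx))
        have hn2 : ¬ ∀ x ∈ t :: rest, pvKindOf x = "polygon" := by
          intro h; have := h t List.mem_cons_self; rw [hk] at this; exact absurd this (by decide)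
        have hn3 : ¬ ∀ x ∈ t :: rest, pvKindOf x = "line" := by
          intro h; have := h t List.mem_cons_self; rw [hk] at this; exact absurd this (by decide)
        rw [if_neg (fun hb => hn1 (h1.mp hb)), if_neg (fun hb => hn2 (h2.mp hb)),
            if_neg (fun hb => hn3 (h3.mp hb)), if_neg hall]
    · -- head is "polygon"
      rw [hk, if_neg (by decide : ¬ ("polygon" : String) = "mixed"),
          pv_altLoop_inv "polygon" (Or.inr (Or.inl rfl)) rest]
      have hn1 : ¬ ∀ x ∈ t :: rest, pvKindOf x = "point" := by
        intro h; have := h t List.mem_cons_self; rw [hk] at this; exact absurd this (by decide)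
      by_cases hall : ∀ x ∈ rest, pvKindOf x = "polygon"
      · have hac : ∀ x ∈ t :: rest, pvKindOf x = "polygon" := by
          intro x hx; rcases List.mem_cons.mp hx with rfl | hx
          · exact hk
          · exact hall x hx
        rw [if_neg (fun hb => hn1 (h1.mp hb)), if_pos (h2.mpr hac), if_pos hall]
      · have hn2 : ¬ ∀ x ∈ t :: rest, pvKindOf x = "polygon" :=
          fun h => hall (fun x hx => h x (List.mem_cons_of_mem _ hx))
        have hn3 : ¬ ∀ x ∈ t :: rest, pvKindOf x = "line" := by
          intro h; have := h t List.mem_cons_self; rw [hk] at this; exact absurd this (by decide)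
        rw [if_neg (fun hb => hn1 (h1.mp hb)), if_neg (fun hb => hn2 (h2.mp hb)),
            if_neg (fun hb => hn3 (h3.mp hb)), if_neg hall]
    · -- head is "line"
      rw [hk, if_neg (by decide : ¬ ("line" : String) = "mixed"),
          pv_altLoop_inv "line" (Or.inr (Or.inr rfl)) rest]
      have hn1 : ¬ ∀ x ∈ t :: rest, pvKindOf x = "point" := by
        intro h; have := h t List.mem_cons_self; rw [hk] at this; exact absurd this (by decide)
      have hn2 : ¬ ∀ x ∈ t :: rest, pvKindOf x = "polygon" := by
        intro h; have := h t List.mem_cons_self; rw [hk] at this; exact absurd this (by decide)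
      by_cases hall : ∀ x ∈ rest, pvKindOf x = "line"
      · have hac : ∀ x ∈ t :: rest, pvKindOf x = "line" := by
          intro x hx; rcases List.mem_cons.mp hx with rfl | hx
          · exact hk
          · exact hall x hx
        rw [if_neg (fun hb => hn1 (h1.mp hb)), if_neg (fun hb => hn2 (h2.mp hb)),
            if_pos (h3.mpr hac), if_pos hall]
      · have hn3 : ¬ ∀ x ∈ t :: rest, pvKindOf x = "line" :=
          fun h => hall (fun x hx => h x (List.mem_cons_of_mem _ hx))
        rw [if_neg (fun hb => hn1 (h1.mp hb)), if_neg (fun hb => hn2 (h2.mp hb)),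
            if_neg (fun hb => hn3 (h3.mp hb)), if_neg hall]
    · -- head is "mixed"
      rw [hk, if_pos rfl]
      have hn1 : ¬ ∀ x ∈ t :: rest, pvKindOf x = "point" := by
        intro h; have := h t List.mem_cons_self; rw [hk] at this; exact absurd this (by decide)
      have hn2 : ¬ ∀ x ∈ t :: rest, pvKindOf x = "polygon" := by
        intro h; have := h t List.mem_cons_self; rw [hk] at this; exact absurd this (by decide)
      have hn3 : ¬ ∀ x ∈ t :: rest, pvKindOf x = "line" := by
        intro h; have := h t List.mem_cons_self; rw [hk] at this; exact absurd this (by decide)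
      rw [if_neg (fun hb => hn1 (h1.mp hb)), if_neg (fun hb => hn2 (h2.mp hb)),
          if_neg (fun hb => hn3 (h3.mp hb))]
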